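-- pv_equiv track=rewrite | github.com/stbrumme/leetcode | 1909.py | canBeIncreasing
-- ===== SOURCE A (Python) =====
-- from typing import List
--
-- def canBeIncreasing(nums: List[int]) -> bool:
--     # check if sorted without duplicates
--     def increasing(data):
--         return all(data[i - 1] < data[i] for i in range(1, len(data)))
--
--     # find first mismatch
--     for i in range(1, len(nums)):
--         if nums[i - 1] >= nums[i]:
--             # remove left  element
--             if increasing(nums[:i - 1] + nums[i:]):
--                 return True
--             # remove right element
--             if increasing(nums[:i] + nums[i + 1:]):
--                 return True
--
--             # more than one misplaced element
--             return False
--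
--     # already strictly increasing, can remove any element
--     return True
-- ===== SOURCE B (Python) =====
-- from typing import List
--
-- def canBeIncreasing(nums: List[int]) -> bool:
--     # Single linear pass, no list slicing: track the last kept value and
--     # whether one element has already been dropped.
--     if len(nums) <= 1:
--         return True
--     prev = nums[0]
--     removed = False
--     for i in range(1, len(nums)):
--         cur = nums[i]
--         if cur <= prev:
--             if removed:
--                 return False
--             removed = True
--             if i == 1 or nums[i - 2] < cur:
--                 prev = cur  # drop the previous element, keep cur
--             # else drop cur: prev stays
--         else:
--             prev = cur
--     return True
-- ===== Notes on version B (the rewrite author's own statement) =====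
-- stated objective: simpler
-- what changed: A finds the first adjacent non-increase and then rebuilds and fully re-checks two sliced copies of the list; B is a single linear scan with no slicing or copying, tracking the last kept value and a removed flag and choosing greedily which element to drop at the first violation.
import Mathlib
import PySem

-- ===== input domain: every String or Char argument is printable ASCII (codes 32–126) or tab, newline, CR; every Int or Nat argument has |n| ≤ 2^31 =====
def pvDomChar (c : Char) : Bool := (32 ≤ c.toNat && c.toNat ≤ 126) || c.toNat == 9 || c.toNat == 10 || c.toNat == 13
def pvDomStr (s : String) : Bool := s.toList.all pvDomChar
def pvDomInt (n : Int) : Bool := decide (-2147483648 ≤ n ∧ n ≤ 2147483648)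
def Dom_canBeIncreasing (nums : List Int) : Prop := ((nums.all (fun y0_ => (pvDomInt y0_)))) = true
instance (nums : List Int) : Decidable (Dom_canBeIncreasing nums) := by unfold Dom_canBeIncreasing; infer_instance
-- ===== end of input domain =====

-- B replaces A's slice-and-recheck on the first mismatch by one linear scan with a
-- 'previous kept value' and a 'removed' flag (objective: simpler, no list copies).

-- ===== PORT A =====
-- A's inner helper `increasing(data)`: all(data[i-1] < data[i] for i in range(1, len(data))).
-- Indices drawn from range(1, len) are nonnegative and in range, so List.getD is exact here.
def pvIncreasing (data : List Int) : Bool :=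
  (PySem.List.pyRange 1 (data.length : Int) 1).all fun i =>
    decide (data.getD (i - 1).toNat 0 < data.getD i.toNat 0)

-- A's `for i in range(1, len(nums))` loop with early return, as index recursion.
-- Slices nums[:i-1], nums[i:], nums[:i], nums[i+1:] have nonnegative bounds: take/drop is exact.
def canBeIncreasingLoop (nums : List Int) (i : Nat) : Bool :=
  if i < nums.length then
    if nums.getD (i - 1) 0 ≥ nums.getD i 0 then
      pvIncreasing (nums.take (i - 1) ++ nums.drop i) ||
      pvIncreasing (nums.take i ++ nums.drop (i + 1))
    else canBeIncreasingLoop nums (i + 1)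
  else true
termination_by nums.length - i

def canBeIncreasing (nums : List Int) : Bool := canBeIncreasingLoop nums 1

-- ===== PORT B =====
-- B's single scan: prev = last kept value, removed = whether one element was dropped.
def pvAltLoop (nums : List Int) (i : Nat) (prev : Int) (removed : Bool) : Bool :=
  if i < nums.length then
    -- cur := nums[i] (index i is in range, so getD is exact)
    if nums.getD i 0 ≤ prev then
      if removed then false
      else if i = 1 ∨ nums.getD (i - 2) 0 < nums.getD i 0 then pvAltLoop nums (i + 1) (nums.getD i 0) true
      else pvAltLoop nums (i + 1) prev true
    else pvAltLoop nums (i + 1) (nums.getD i 0) removed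
  else true
termination_by nums.length - i

def canBeIncreasing_alt (nums : List Int) : Bool :=
  if nums.length ≤ 1 then true
  else pvAltLoop nums 1 (nums.getD 0 0) false

-- ===== PRECONDITION & SPEC =====
def Spec_canBeIncreasing (nums : List Int) (out : Bool) : Prop := out = canBeIncreasing_alt nums
instance (nums : List Int) (out : Bool) : Decidable (Spec_canBeIncreasing nums out) := by unfold Spec_canBeIncreasing; infer_instance

-- ===== CLAIM (what is proved, stated in full; the proofs are below) =====
def Claim_equal_canBeIncreasing : Prop := ∀ (nums : List Int), Dom_canBeIncreasing nums → Spec_canBeIncreasing nums (canBeIncreasing nums)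

-- ===== LEMMAS AND PROOFS =====

-- A's `increasing` tests exactly strict chain ordering.
theorem pvIncreasing_iff (data : List Int) :
    pvIncreasing data = true ↔ List.IsChain (· < ·) data := by
  rw [List.isChain_iff_getElem]
  unfold pvIncreasing
  rw [List.all_eq_true]
  constructor
  · intro h k hk
    have hm : ((k : Int) + 1) ∈ PySem.List.pyRange 1 (data.length : Int) 1 := by
      rw [PySem.List.mem_pyRange_one]; omega
    have := h _ hm
    simp only [decide_eq_true_eq] at this
    have h1 : (((k : Int) + 1) - 1).toNat = k := by omega
    have h2 : ((k : Int) + 1).toNat = k + 1 := by omega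
    rw [h1, h2] at this
    rwa [List.getD_eq_getElem data 0 (by omega), List.getD_eq_getElem data 0 hk] at this
  · intro h i hi
    rw [PySem.List.mem_pyRange_one] at hi
    simp only [decide_eq_true_eq]
    have h1 : (i - 1).toNat + 1 < data.length := by omega
    have h2 : i.toNat = (i - 1).toNat + 1 := by omega
    rw [h2, List.getD_eq_getElem data 0 (by omega), List.getD_eq_getElem data 0 h1]
    exact h _ h1

-- a smaller head keeps a chain a chain
theorem chain_head_mono {a b : Int} {l : List Int} (hba : b ≤ a)
    (h : List.IsChain (· < ·) (a :: l)) : List.IsChain (· < ·) (b :: l) := by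
  rw [List.isChain_cons] at h ⊢
  exact ⟨fun y hy => lt_of_le_of_lt hba (h.1 y hy), h.2⟩

theorem getLast?_take {nums : List Int} {i : Nat} (h1 : 0 < i) (h2 : i ≤ nums.length) :
    (nums.take i).getLast? = some (nums.getD (i - 1) 0) := by
  rw [List.getLast?_eq_getElem?, List.getElem?_take, List.length_take]
  have hlen : min i nums.length = i := by omega
  rw [hlen]
  simp only [show i - 1 < i from by omega, if_pos]
  rw [List.getD_eq_getElem nums 0 (by omega), List.getElem?_eq_getElem (by omega)]

-- with `removed = True`, B's remaining scan tests Chain' on prev :: rest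
theorem altLoop_removed (nums : List Int) (i : Nat) (prev : Int) :
    pvAltLoop nums i prev true = decide (List.IsChain (· < ·) (prev :: nums.drop i)) := by
  by_cases h : i < nums.length
  · rw [pvAltLoop, if_pos h]
    by_cases hle : nums.getD i 0 ≤ prev
    · rw [if_pos hle, if_pos rfl]
      rw [List.getD_eq_getElem nums 0 h] at hle
      have hnc : ¬ List.IsChain (· < ·) (prev :: nums.drop i) := by
        rw [List.drop_eq_getElem_cons h, List.isChain_cons_cons]
        intro ⟨hcl, _⟩; omega
      simp [hnc]
    · rw [if_neg hle, altLoop_removed nums (i + 1) (nums.getD i 0)]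
      rw [List.getD_eq_getElem nums 0 h] at hle ⊢
      have hiff : List.IsChain (· < ·) (prev :: nums.drop i)
          ↔ List.IsChain (· < ·) (nums[i] :: nums.drop (i + 1)) := by
        rw [List.drop_eq_getElem_cons h, List.isChain_cons_cons]
        exact and_iff_right (by omega)
      simp [hiff]
  · rw [pvAltLoop, if_neg h]
    rw [List.drop_eq_nil_of_le (show nums.length ≤ i by omega)]
    simp
termination_by nums.length - i

-- main loop invariant: before any removal, prev = nums[i-1] and the prefix is a chain
theorem loop_agree (nums : List Int) (i : Nat) (h1 : 1 ≤ i) (h2 : i ≤ nums.length)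
    (hc : List.IsChain (· < ·) (nums.take i)) :
    canBeIncreasingLoop nums i = pvAltLoop nums i (nums.getD (i - 1) 0) false := by
  by_cases h : i < nums.length
  · rw [canBeIncreasingLoop, if_pos h, pvAltLoop, if_pos h]
    set a := nums.getD (i - 1) 0 with ha
    set b := nums.getD i 0 with hb
    have hbE : b = nums[i] := List.getD_eq_getElem nums 0 h
    by_cases hge : a ≥ b
    · rw [if_pos hge, if_pos (show b ≤ a from hge)]
      simp only [Bool.false_eq_true, if_false]
      -- A: test both removals; B: pick branch by the junction condition
      have hdropi : nums.drop i = nums[i] :: nums.drop (i + 1) := List.drop_eq_getElem_cons h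
      have hCkeep := altLoop_removed nums (i + 1) b
      have hCleft := altLoop_removed nums (i + 1) a
      -- characterise A's two slice tests
      have hT2 : pvIncreasing (nums.take i ++ nums.drop (i + 1))
          = decide (List.IsChain (· < ·) (a :: nums.drop (i + 1))) := by
        rw [Bool.eq_iff_iff, pvIncreasing_iff, decide_eq_true_eq, List.isChain_append,
          List.isChain_cons]
        rw [getLast?_take (by omega) (by omega), ← ha]
        constructor
        · intro ⟨_, hc2, hj⟩
          exact ⟨fun y hy => hj a rfl y hy, hc2⟩
        · intro ⟨hhead, hc2⟩
          exact ⟨hc, hc2, fun x hx y hy => by rw [Option.mem_def, Option.some_inj] at hx; subst hx; exact hhead y hy⟩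
      have hT1 : pvIncreasing (nums.take (i - 1) ++ nums.drop i)
          = decide ((i = 1 ∨ nums.getD (i - 2) 0 < b) ∧ List.IsChain (· < ·) (b :: nums.drop (i + 1))) := by
        rw [Bool.eq_iff_iff, pvIncreasing_iff, decide_eq_true_eq, List.isChain_append]
        have hcpre : List.IsChain (· < ·) (nums.take (i - 1)) := by
          have := hc.take (i - 1)
          rwa [List.take_take, show min (i-1) i = i - 1 from by omega] at this
        have hdchain : List.IsChain (· < ·) (nums.drop i) ↔ List.IsChain (· < ·) (b :: nums.drop (i + 1)) := by
          rw [hdropi, hbE]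
        by_cases h1' : i = 1
        · subst h1'
          simp only [show (1 : Nat) - 1 = 0 from rfl, List.take_zero]
          rw [hdchain]
          simp
        · have hi2 : 2 ≤ i := by omega
          have hlast : (nums.take (i - 1)).getLast? = some (nums.getD (i - 2) 0) := by
            have := getLast?_take (nums := nums) (i := i - 1) (by omega) (by omega)
            rwa [show i - 1 - 1 = i - 2 from by omega] at this
          constructor
          · intro ⟨_, hc2, hj⟩
            rw [hdchain] at hc2
            refine ⟨Or.inr ?_, hc2⟩
            have := hj _ (by rw [hlast]; rfl) nums[i] (by rw [hdropi]; rfl)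
            rwa [← hbE] at this
          · intro ⟨hcond, hc2⟩
            rcases hcond with hcond | hcond
            · omega
            · refine ⟨hcpre, hdchain.mpr hc2, ?_⟩
              intro x hx y hy
              rw [hlast, Option.mem_def, Option.some_inj] at hx
              rw [hdropi, List.head?_cons, Option.mem_def, Option.some_inj] at hy
              subst hx; subst hy
              rw [← hbE]; exact hcond
      rw [hT1, hT2, hCkeep, hCleft]
      by_cases hcond : i = 1 ∨ nums.getD (i - 2) 0 < b
      · rw [if_pos hcond]
        simp only [hcond, true_and]
        by_cases hK : List.IsChain (· < ·) (b :: nums.drop (i + 1))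
        · simp [hK]
        · have hL : ¬ List.IsChain (· < ·) (a :: nums.drop (i + 1)) :=
            fun hL => hK (chain_head_mono hge hL)
          simp [hK, hL]
      · rw [if_neg hcond]
        rw [decide_eq_false (fun hck => hcond hck.1), Bool.false_or]
    · rw [if_neg hge, if_neg (show ¬ b ≤ a from hge)]
      have hrec := loop_agree nums (i + 1) (by omega) (by omega) (by
        rw [List.take_add_one, List.getElem?_eq_getElem h]
        rw [List.isChain_append]
        refine ⟨hc, List.isChain_singleton _, ?_⟩
        intro x hx y hy
        rw [getLast?_take (by omega) (by omega), Option.mem_def, Option.some_inj] at hx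
        simp only [Option.toList_some, List.head?_cons, Option.mem_def, Option.some_inj] at hy
        subst hx; subst hy
        have hab : a < b := by omega
        rw [ha, hbE] at hab
        exact hab)
      rw [hrec, show i + 1 - 1 = i from by omega, ← hb]
  · rw [canBeIncreasingLoop, if_neg h, pvAltLoop, if_neg h]
termination_by nums.length - i

-- ===== VERDICT (by name: the statement is the Claim_ definition above) =====
theorem canBeIncreasing_spec : Claim_equal_canBeIncreasing := by
  intro nums _
  unfold Spec_canBeIncreasing canBeIncreasing canBeIncreasing_alt
  by_cases hlen : nums.length ≤ 1
  · rw [if_pos hlen, canBeIncreasingLoop, if_neg (by omega)]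
  · rw [if_neg hlen]
    have := loop_agree nums 1 (le_refl 1) (by omega) (by
      rw [List.isChain_iff_getElem]
      intro k hk
      rw [List.length_take] at hk
      omega)
    rwa [show (1 : Nat) - 1 = 0 from rfl] at this
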